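-- pv_equiv track=rewrite | github.com/saaim12/DSA-Python | Dynamic Programming/Dp On Grids/Geeks_training_OR_Ninja_training_2D.py | geek_training_recursive
-- ===== SOURCE A (Python) =====
-- def geek_training_recursive(arr):
--     """
--     Recursive solution (no memoization)
--     """
--     total_days = len(arr)
--     total_tasks = len(arr[0])
--
--     def check(day, last):
--         if day == 0:
--             maxi = 0
--             for i in range(total_tasks):
--                 if i != last:
--                     maxi = max(maxi, arr[0][i])
--             return maxi
--
--         maxi = 0
--         for i in range(total_tasks):
--             if i != last:
--                 points = arr[day][i] + check(day - 1, i)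
--                 maxi = max(maxi, points)
--         return maxi
--
--     return check(total_days - 1, total_tasks)
-- ===== SOURCE B (Python) =====
-- def geek_training_recursive(arr):
--     days = len(arr)
--     tasks = len(arr[0])
--     # dp[last] = best total for days 0..d if the NEXT day's task is `last`
--     # (last == tasks is the virtual "no restriction" value used at the top)
--     dp = []
--     for last in range(tasks + 1):
--         m = 0
--         for i in range(tasks):
--             if i != last:
--                 m = max(m, arr[0][i])
--         dp.append(m)
--     for day in range(1, days):
--         ndp = []
--         for last in range(tasks + 1):
--             m = 0
--             for i in range(tasks):
--                 if i != last:
--                     m = max(m, arr[day][i] + dp[i])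
--             ndp.append(m)
--         dp = ndp
--     return dp[tasks]
-- ===== Notes on version B (the rewrite author's own statement) =====
-- stated objective: faster
-- what changed: Replaced the exponential branching recursion over (day,last) with a bottom-up DP table of tasks+1 values per day, so each day is computed once from the previous day's row.
-- outside the precondition, e.g. on geek_training_recursive([[5], [], [3]]): A returns 3, B raises IndexError
import Mathlib
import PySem

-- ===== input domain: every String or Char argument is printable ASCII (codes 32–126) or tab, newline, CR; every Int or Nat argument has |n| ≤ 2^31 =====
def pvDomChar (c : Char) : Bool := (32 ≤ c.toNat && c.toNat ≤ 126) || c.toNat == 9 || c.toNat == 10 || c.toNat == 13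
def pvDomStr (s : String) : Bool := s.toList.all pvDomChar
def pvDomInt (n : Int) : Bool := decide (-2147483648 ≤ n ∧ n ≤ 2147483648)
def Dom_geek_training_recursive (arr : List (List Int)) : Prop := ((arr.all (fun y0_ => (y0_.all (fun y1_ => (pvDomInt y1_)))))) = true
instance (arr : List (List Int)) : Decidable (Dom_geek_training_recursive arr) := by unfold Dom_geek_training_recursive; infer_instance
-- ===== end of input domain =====

-- B replaces A's exponential recursion by a bottom-up DP over (day, last) rows; equivalence of the return values is proved on Pre_ (where the Python A returns).

-- ===== PORT A =====
-- inner recursion `check(day, last)`; `day` counts down, `last` is a Python int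
def pvCheck (arr : List (List Int)) (tasks : Nat) : Nat → Int → Int
  | 0, last =>
      (List.range tasks).foldl
        (fun maxi (i : Nat) => if (i : Int) ≠ last then max maxi ((arr.getD 0 []).getD i 0) else maxi) 0
  | day + 1, last =>
      (List.range tasks).foldl
        (fun maxi (i : Nat) =>
          if (i : Int) ≠ last then
            max maxi ((arr.getD (day + 1) []).getD i 0 + pvCheck arr tasks day (i : Int))
          else maxi) 0

def geek_training_recursive (arr : List (List Int)) : Int :=
  pvCheck arr (arr.headD []).length (arr.length - 1) ((arr.headD []).length : Int)

-- ===== PORT B =====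
-- first day's dp row: dp[last] for last = 0..tasks
def pvDp0 (arr : List (List Int)) (tasks : Nat) : List Int :=
  (List.range (tasks + 1)).map (fun last : Nat =>
    (List.range tasks).foldl
      (fun m (i : Nat) => if (i : Int) ≠ (last : Int) then max m ((arr.getD 0 []).getD i 0) else m) 0)

-- one day's transition: ndp from dp
def pvStep (arr : List (List Int)) (tasks : Nat) (dp : List Int) (day : Nat) : List Int :=
  (List.range (tasks + 1)).map (fun last : Nat =>
    (List.range tasks).foldl
      (fun m (i : Nat) =>
        if (i : Int) ≠ (last : Int) then max m ((arr.getD day []).getD i 0 + dp.getD i 0) else m) 0)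

def geek_training_recursive_alt (arr : List (List Int)) : Int :=
  ((List.range' 1 (arr.length - 1)).foldl
      (pvStep arr (arr.headD []).length) (pvDp0 arr (arr.headD []).length)).getD
    (arr.headD []).length 0

-- ===== PRECONDITION & SPEC =====
-- Pre_ excludes the empty list (A raises IndexError at len(arr[0])) and ragged inputs whose
-- rows are shorter than the first row: there A raises IndexError except in the degenerate
-- tasks ≤ 1 cases where its recursion never touches the short rows, and on those B raises.
def Pre_geek_training_recursive (arr : List (List Int)) : Prop :=
  arr ≠ [] ∧ ∀ row ∈ arr, (arr.headD []).length ≤ row.length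
instance (arr : List (List Int)) : Decidable (Pre_geek_training_recursive arr) := by
  unfold Pre_geek_training_recursive; infer_instance
def pvWitness_geek_training_recursive : List (List Int) := [[1, 2], [3, 4]]

def Spec_geek_training_recursive (arr : List (List Int)) (out : Int) : Prop :=
  out = geek_training_recursive_alt arr
instance (arr : List (List Int)) (out : Int) : Decidable (Spec_geek_training_recursive arr out) := by
  unfold Spec_geek_training_recursive; infer_instance

-- ===== CLAIM (what is proved, stated in full; the proofs are below) =====
def Claim_equal_geek_training_recursive : Prop :=
  ∀ (arr : List (List Int)), Dom_geek_training_recursive arr →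
    Pre_geek_training_recursive arr →
    Spec_geek_training_recursive arr (geek_training_recursive arr)

-- ===== LEMMAS AND PROOFS =====

-- getD on a map over range
lemma getD_map_range (f : Nat → Int) (n j : Nat) (h : j < n) :
    ((List.range n).map f).getD j 0 = f j := by
  simp [List.getD, h]

-- the dp row after processing days 1..d is exactly check(d, ·) tabulated over last = 0..tasks
lemma dp_inv (arr : List (List Int)) (tasks d : Nat) :
    (List.range' 1 d).foldl (pvStep arr tasks) (pvDp0 arr tasks)
      = (List.range (tasks + 1)).map (fun last : Nat => pvCheck arr tasks d (last : Int)) := by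
  induction d with
  | zero =>
      simp [pvDp0, pvCheck]
  | succ d ih =>
      rw [List.range'_concat, List.foldl_append, ih]
      simp only [List.foldl_cons, List.foldl_nil, pvStep, pvCheck]
      refine List.map_congr_left (fun last hlast => ?_)
      apply PySem.List.foldl_congr_mem
      intro m i hi
      have hi' : i < tasks + 1 := Nat.lt_succ_of_lt (List.mem_range.mp hi)
      rw [getD_map_range _ _ _ hi', show 1 + 1 * d = d + 1 from by omega]

-- ===== VERDICT (by name: the statement is the Claim_ definition above) =====
theorem geek_training_recursive_spec : Claim_equal_geek_training_recursive := by
  intro arr _ _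
  unfold Spec_geek_training_recursive geek_training_recursive geek_training_recursive_alt
  rw [dp_inv, getD_map_range _ _ _ (Nat.lt_succ_self _)]
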